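-- pv_equiv track=rewrite | github.com/siddhant1/neetcode-srs | neetcode_srs/problems.py | _js_to_json
-- ===== SOURCE A (Python) =====
-- def _js_to_json(src: str) -> str:
--     """Convert the JS object-literal array to JSON.
--
--     Handles two non-JSON-isms: unquoted keys and !0 / !1 boolean shorthand.
--     String contents are left untouched.
--     """
--     out: list[str] = []
--     i = 0
--     n = len(src)
--     in_str = False
--     esc = False
--     while i < n:
--         c = src[i]
--         if in_str:
--             out.append(c)
--             if esc:
--                 esc = False
--             elif c == "\\":
--                 esc = True
--             elif c == '"':
--                 in_str = False
--             i += 1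
--             continue
--         if c == '"':
--             out.append(c)
--             in_str = True
--             i += 1
--             continue
--         if c in "{,":
--             out.append(c)
--             i += 1
--             while i < n and src[i].isspace():
--                 out.append(src[i])
--                 i += 1
--             j = i
--             while j < n and (src[j].isalnum() or src[j] in "_$"):
--                 j += 1
--             if j > i and j < n and src[j] == ":":
--                 out.append('"' + src[i:j] + '"')
--                 i = j
--             continue
--         if c == "!" and i + 1 < n and src[i + 1] in "01":
--             out.append("true" if src[i + 1] == "0" else "false")
--             i += 2
--             continue
--         out.append(c)
--         i += 1
--     return "".join(out)
-- ===== SOURCE B (Python) =====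
-- def _js_to_json(src: str) -> str:
--     """Convert the JS object-literal array to JSON (chunk-based single pass)."""
--     out: list[str] = []
--     i = 0
--     n = len(src)
--     while i < n:
--         c = src[i]
--         if c == '"':
--             # slice the whole string literal in one go (escape-aware scan)
--             j = i + 1
--             while j < n:
--                 if src[j] == "\\":
--                     j += 2
--                 elif src[j] == '"':
--                     j += 1
--                     break
--                 else:
--                     j += 1
--             out.append(src[i:j])
--             i = j
--         elif c in "{,":
--             j = i + 1
--             while j < n and src[j].isspace():
--                 j += 1
--             k = j
--             while k < n and (src[k].isalnum() or src[k] in "_$"):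
--                 k += 1
--             if k > j and k < n and src[k] == ":":
--                 out.append(src[i:j])
--                 out.append('"' + src[j:k] + '"')
--                 i = k
--             else:
--                 out.append(src[i:j])
--                 i = j
--         elif c == "!" and i + 1 < n and src[i + 1] in "01":
--             out.append("true" if src[i + 1] == "0" else "false")
--             i += 2
--         else:
--             out.append(c)
--             i += 1
--     return "".join(out)
-- ===== Notes on version B (the rewrite author's own statement) =====
-- stated objective: alternative
-- what changed: Replaces the character-by-character loop with mutable in_str/esc flags by a chunk-based scanner that slices whole string literals, whitespace runs and identifiers and appends them as single pieces, so the main loop carries no string-mode state.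
import Mathlib
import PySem

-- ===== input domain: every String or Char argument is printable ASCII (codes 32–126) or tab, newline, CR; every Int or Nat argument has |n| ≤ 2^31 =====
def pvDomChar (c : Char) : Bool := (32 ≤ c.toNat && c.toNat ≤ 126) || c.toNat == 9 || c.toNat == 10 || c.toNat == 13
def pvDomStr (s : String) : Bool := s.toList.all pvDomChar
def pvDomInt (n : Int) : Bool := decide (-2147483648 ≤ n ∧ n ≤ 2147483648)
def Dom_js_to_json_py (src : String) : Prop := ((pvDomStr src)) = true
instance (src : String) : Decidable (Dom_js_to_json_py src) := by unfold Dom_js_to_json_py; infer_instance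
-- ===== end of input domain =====

-- B restructures A's character-by-character loop (mutable in_str/esc flags) into a chunk-based
-- scanner that slices whole string literals / whitespace runs / identifiers; same output ('alternative').

-- shared character class: src[k].isalnum() or src[k] in "_$"
def pvIdentChar (c : Char) : Bool := PySem.Chars.isalnum c || c == '_' || c == '$'

-- ===== PORT A =====
-- inner loop 'while i < n and src[i].isspace(): out.append(src[i]); i += 1' : (appended chars, rest)
def pvWsA : List Char → List Char × List Char
  | [] => ([], [])
  | c :: t =>
    if PySem.Chars.isspace c then ((c :: (pvWsA t).1), (pvWsA t).2)
    else ([], c :: t)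

-- the 'while j < n and (…): j += 1' scan, returning j - i
def pvIdentLen : List Char → Nat
  | [] => 0
  | c :: t => if pvIdentChar c then pvIdentLen t + 1 else 0

theorem pvWsA_snd_len (t : List Char) : (pvWsA t).2.length ≤ t.length := by
  induction t with
  | nil => simp [pvWsA]
  | cons c t ih =>
    simp only [pvWsA]
    split
    · simpa using Nat.le_succ_of_le ih
    · simp

-- A's main while loop; state (remaining input, in_str, esc); returns the appended output
def pvLoopA : List Char → Bool → Bool → List Char
  | [], _, _ => []
  | c :: t, in_str, esc =>
    if in_str then
      c :: (if esc then pvLoopA t true false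
            else if c = '\\' then pvLoopA t true true
            else if c = '"' then pvLoopA t false esc
            else pvLoopA t true esc)
    else if c = '"' then
      c :: pvLoopA t true esc
    else if c = '{' ∨ c = ',' then
      if 0 < pvIdentLen (pvWsA t).2 ∧ ((pvWsA t).2.drop (pvIdentLen (pvWsA t).2)).head? = some ':' then
        c :: (pvWsA t).1 ++ '"' :: (pvWsA t).2.take (pvIdentLen (pvWsA t).2) ++
          '"' :: pvLoopA ((pvWsA t).2.drop (pvIdentLen (pvWsA t).2)) false esc
      else
        c :: (pvWsA t).1 ++ pvLoopA (pvWsA t).2 false esc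
    else if c = '!' ∧ (t.head? = some '0' ∨ t.head? = some '1') then
      (if t.head? = some '0' then "true".toList else "false".toList) ++ pvLoopA t.tail false esc
    else
      c :: pvLoopA t false esc
  termination_by t _ _ => t.length
  decreasing_by
    all_goals simp only [List.length_cons, List.length_tail, List.length_drop, Nat.lt_succ_iff]
    all_goals try omega
    all_goals first
      | exact pvWsA_snd_len _
      | exact le_trans (Nat.sub_le _ _) (pvWsA_snd_len _)

def js_to_json_py (src : String) : String := String.ofList (pvLoopA src.toList false false)

-- ===== PORT B =====
-- B's escape-aware scan of a string literal body: (src[i+1:j], src[j:]) for the j loop of Source B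
def pvStrChunk : List Char → List Char × List Char
  | [] => ([], [])
  | c :: t =>
    if c = '\\' then
      match t with
      | [] => ([c], [])
      | d :: t' => ((c :: d :: (pvStrChunk t').1), (pvStrChunk t').2)
    else if c = '"' then ([c], t)
    else ((c :: (pvStrChunk t).1), (pvStrChunk t).2)
  termination_by t => t.length
  decreasing_by all_goals simp

theorem pvStrChunk_snd_len (t : List Char) : (pvStrChunk t).2.length ≤ t.length := by
  induction t using pvStrChunk.induct with
  | case1 => simp [pvStrChunk]
  | case2 => simp [pvStrChunk]
  | case3 d t' ih => rw [pvStrChunk.eq_def]; simp; omega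
  | case4 t' h => rw [pvStrChunk.eq_def]; simp
  | case5 d t' h1 h2 ih => rw [pvStrChunk.eq_def]; simp [h1, h2]; omega

-- B's main while loop (chunk-based, no string-mode flags)
def pvLoopB : List Char → List Char
  | [] => []
  | c :: t =>
    if c = '"' then
      c :: (pvStrChunk t).1 ++ pvLoopB (pvStrChunk t).2
    else if c = '{' ∨ c = ',' then
      if (t.dropWhile PySem.Chars.isspace).takeWhile pvIdentChar ≠ [] ∧
         ((t.dropWhile PySem.Chars.isspace).dropWhile pvIdentChar).head? = some ':' then
        c :: t.takeWhile PySem.Chars.isspace ++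
          '"' :: (t.dropWhile PySem.Chars.isspace).takeWhile pvIdentChar ++
          '"' :: pvLoopB ((t.dropWhile PySem.Chars.isspace).dropWhile pvIdentChar)
      else
        c :: t.takeWhile PySem.Chars.isspace ++ pvLoopB (t.dropWhile PySem.Chars.isspace)
    else if c = '!' ∧ (t.head? = some '0' ∨ t.head? = some '1') then
      (if t.head? = some '0' then "true".toList else "false".toList) ++ pvLoopB t.tail
    else
      c :: pvLoopB t
  termination_by t => t.length
  decreasing_by
    all_goals simp only [List.length_cons, List.length_tail, Nat.lt_succ_iff]
    all_goals try omega
    all_goals first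
      | exact pvStrChunk_snd_len _
      | exact List.length_dropWhile_le _ _
      | exact le_trans (List.length_dropWhile_le _ _) (List.length_dropWhile_le _ _)

def js_to_json_py_alt (src : String) : String := String.ofList (pvLoopB src.toList)

-- ===== PRECONDITION & SPEC =====
def Spec_js_to_json_py (src : String) (out : String) : Prop := out = js_to_json_py_alt src
instance (src : String) (out : String) : Decidable (Spec_js_to_json_py src out) := by unfold Spec_js_to_json_py; infer_instance

-- ===== CLAIM (what is proved, stated in full; the proofs are below) =====
def Claim_equal_js_to_json_py : Prop := ∀ (src : String), Dom_js_to_json_py src → Spec_js_to_json_py src (js_to_json_py src)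

-- ===== LEMMAS AND PROOFS =====

theorem pvWsA_eq (t : List Char) :
    pvWsA t = (t.takeWhile PySem.Chars.isspace, t.dropWhile PySem.Chars.isspace) := by
  induction t with
  | nil => simp [pvWsA]
  | cons c t ih =>
    simp only [pvWsA, List.takeWhile, List.dropWhile]
    split <;> simp_all

theorem pvIdentLen_take (t : List Char) : t.take (pvIdentLen t) = t.takeWhile pvIdentChar := by
  induction t with
  | nil => simp [pvIdentLen]
  | cons c t ih =>
    simp only [pvIdentLen, List.takeWhile]
    by_cases h : pvIdentChar c <;> simp_all

theorem pvIdentLen_drop (t : List Char) : t.drop (pvIdentLen t) = t.dropWhile pvIdentChar := by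
  induction t with
  | nil => simp [pvIdentLen]
  | cons c t ih =>
    simp only [pvIdentLen, List.dropWhile]
    by_cases h : pvIdentChar c <;> simp_all

theorem pvIdentLen_pos_iff (t : List Char) :
    0 < pvIdentLen t ↔ t.takeWhile pvIdentChar ≠ [] := by
  cases t with
  | nil => simp [pvIdentLen]
  | cons c t =>
    simp only [pvIdentLen, List.takeWhile]
    by_cases h : pvIdentChar c <;> simp [h]

-- A's in-string mode (entered with esc = false) emits exactly B's string chunk
theorem pvLoopA_str (t : List Char) :
    pvLoopA t true false = (pvStrChunk t).1 ++ pvLoopA (pvStrChunk t).2 false false := by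
  induction t using pvStrChunk.induct with
  | case1 => simp [pvStrChunk, pvLoopA]
  | case2 => simp [pvStrChunk, pvLoopA]
  | case3 d t' ih => rw [pvStrChunk.eq_def]; simp [pvLoopA, ih]
  | case4 t' h => rw [pvStrChunk.eq_def]; simp [pvLoopA]
  | case5 d t' h1 h2 ih => rw [pvStrChunk.eq_def]; simp [pvLoopA, h1, h2, ih]

theorem pvLoopA_eq_pvLoopB (t : List Char) : pvLoopA t false false = pvLoopB t := by
  induction t using pvLoopB.induct
  case case1 => simp [pvLoopA, pvLoopB]
  case case2 t ih =>
    simp only [pvLoopA, pvLoopB, Bool.false_eq_true, if_false, if_true]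
    rw [pvLoopA_str, ih, List.cons_append]
  case case3 c t h h2 h3 ih =>
    simp only [pvLoopB, if_neg h, if_pos h2, if_pos h3]
    simp only [pvLoopA, Bool.false_eq_true, if_false, if_neg h, if_pos h2, pvWsA_eq,
      pvIdentLen_take, pvIdentLen_drop, pvIdentLen_pos_iff]
    rw [if_pos h3, ih]
  case case4 c t h h2 h3 ih =>
    simp only [pvLoopB, if_neg h, if_pos h2, if_neg h3]
    simp only [pvLoopA, Bool.false_eq_true, if_false, if_neg h, if_pos h2, pvWsA_eq,
      pvIdentLen_take, pvIdentLen_drop, pvIdentLen_pos_iff]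
    rw [if_neg h3, ih]
  case case5 c t h h2 h3 ih =>
    simp only [pvLoopB, if_neg h, if_neg h2, if_pos h3]
    simp only [pvLoopA, Bool.false_eq_true, if_false, if_neg h, if_neg h2, if_pos h3]
    rw [ih]
  case case6 c t h h2 h3 ih =>
    simp only [pvLoopB, if_neg h, if_neg h2, if_neg h3]
    simp only [pvLoopA, Bool.false_eq_true, if_false, if_neg h, if_neg h2, if_neg h3]
    rw [ih]

-- ===== VERDICT (by name: the statement is the Claim_ definition above) =====
theorem js_to_json_py_spec : Claim_equal_js_to_json_py := by
  intro src _
  unfold Spec_js_to_json_py js_to_json_py js_to_json_py_alt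
  rw [pvLoopA_eq_pvLoopB]
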